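-- pv_equiv track=rewrite | github.com/ofey404/RPS_simulation | sketch/triangle.py | coordinate
-- ===== SOURCE A (Python) =====
-- def coordinate(n):
--     coordinates = {}
--     head = 0
--     for i in range(n):
--         head += i
--         for j in range(head, head+i+1):
--             coordinates[(i-j+head, j-head)] = j
--     return coordinates
-- ===== SOURCE B (Python) =====
-- def coordinate(n):
--     coordinates = {}
--     i = 0
--     k = 0
--     while i < n:
--         coordinates[(i - k, k)] = len(coordinates)
--         if k < i:
--             k += 1
--         else:
--             i += 1
--             k = 0
--     return coordinates
-- ===== Notes on version B (the rewrite author's own statement) =====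
-- stated objective: alternative
-- what changed: Replaced A's nested for-loops with a running 'head' accumulator and absolute inner indices by a single flat while-loop that advances the cell (i,k) like an odometer and uses the current dict size as the stored index, so neither an inner range nor an index accumulator exists.
import Mathlib
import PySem

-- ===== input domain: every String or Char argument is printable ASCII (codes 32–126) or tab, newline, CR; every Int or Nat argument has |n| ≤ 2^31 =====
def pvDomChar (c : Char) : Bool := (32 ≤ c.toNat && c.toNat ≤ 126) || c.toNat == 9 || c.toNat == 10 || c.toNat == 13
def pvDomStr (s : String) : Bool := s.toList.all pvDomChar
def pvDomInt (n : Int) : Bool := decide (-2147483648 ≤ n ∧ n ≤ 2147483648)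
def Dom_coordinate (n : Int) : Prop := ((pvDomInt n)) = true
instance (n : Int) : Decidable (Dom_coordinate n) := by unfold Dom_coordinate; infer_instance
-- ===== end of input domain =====

-- B replaces A's nested loops with a 'head' accumulator by a single flat while-loop that
-- advances the cell (i,k) like an odometer and stores the current dict size as the index
-- (objective: alternative decomposition, same asymptotic cost).

-- ===== PORT A =====
def coordinate (n : Int) : List (Int × Int × Int) :=
  let st := (PySem.List.pyRange 0 n 1).foldl
    (fun (st : PySem.Dict (Int × Int) Int × Int) i =>
      let head := st.2 + i
      ((PySem.List.pyRange head (head + i + 1) 1).foldl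
          (fun d j => d.insert (i - j + head, j - head) j) st.1,
       head))
    (PySem.Dict.empty, 0)
  st.1.items.map (fun p => (p.1.1, p.1.2, p.2))

-- ===== PORT B =====
-- the while-loop of Source B: state (i, k, coordinates)
def coordLoop (n i k : Int) (d : PySem.Dict (Int × Int) Int) : PySem.Dict (Int × Int) Int :=
  if i < n then
    let d' := d.insert (i - k, k) (d.items.length : Int)
    if k < i then coordLoop n i (k + 1) d'
    else coordLoop n (i + 1) 0 d'
  else d
termination_by ((n - i).toNat, (i - k).toNat)
decreasing_by
  · apply Prod.Lex.right
    omega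
  · apply Prod.Lex.left
    omega

def coordinate_alt (n : Int) : List (Int × Int × Int) :=
  (coordLoop n 0 0 PySem.Dict.empty).items.map (fun p => (p.1.1, p.1.2, p.2))

-- ===== PRECONDITION & SPEC =====
def Spec_coordinate (n : Int) (out : List (Int × Int × Int)) : Prop := out = coordinate_alt n
instance (n : Int) (out : List (Int × Int × Int)) : Decidable (Spec_coordinate n out) := by unfold Spec_coordinate; infer_instance

-- ===== CLAIM (what is proved, stated in full; the proofs are below) =====
def Claim_equal_coordinate : Prop := ∀ (n : Int), Dom_coordinate n → Spec_coordinate n (coordinate n)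

-- ===== LEMMAS AND PROOFS =====

-- head accumulated after m outer iterations (sum 0 + 1 + … + (m-1))
def pvP : Nat → Int
  | 0 => 0
  | m + 1 => pvP m + m

-- diagonal m of the finished dict's item list
def pvD (i : Nat) : List ((Int × Int) × Int) :=
  (List.range (i + 1)).map
    (fun k : Nat => (((i : Int) - (k : Int), (k : Int)), pvP i + (i : Int) + (k : Int)))

-- item list after the first m full diagonals
def pvF (m : Nat) : List ((Int × Int) × Int) :=
  (List.range m).flatMap pvD

-- item list after m full diagonals and k cells of diagonal m
def pvG (m k : Nat) : List ((Int × Int) × Int) :=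
  pvF m ++ (List.range k).map
    (fun j : Nat => (((m : Int) - (j : Int), (j : Int)), pvP m + (m : Int) + (j : Int)))

lemma pvF_succ (m : Nat) : pvF (m + 1) = pvF m ++ pvD m := by
  unfold pvF
  rw [List.range_succ, List.flatMap_append]
  simp

lemma pvG_full (m : Nat) : pvG m (m + 1) = pvF (m + 1) := by
  rw [pvF_succ]; rfl

lemma mem_pvF_sum {m : Nat} {p : (Int × Int) × Int} (hp : p ∈ pvF m) :
    p.1.1 + p.1.2 < m := by
  simp only [pvF, List.mem_flatMap, List.mem_range, pvD, List.mem_map] at hp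
  obtain ⟨i, hi, k, hk, rfl⟩ := hp
  show (i : Int) - k + k < m
  omega

lemma length_pvF (m : Nat) : ((pvF m).length : Int) = pvP m + m := by
  induction m with
  | zero => simp [pvF, pvP]
  | succ t ih =>
    rw [pvF_succ, List.length_append]
    simp only [pvD, List.length_map, List.length_range, pvP]
    push_cast
    push_cast at ih
    omega

lemma length_pvG (m k : Nat) : ((pvG m k).length : Int) = pvP m + m + k := by
  rw [pvG, List.length_append, List.length_map, List.length_range]
  push_cast
  have := length_pvF m
  omega

lemma contains_pvF_false (m : Nat) (q : Int × Int) (hq : q.1 + q.2 = m) :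
    (PySem.Dict.mk (pvF m)).contains q = false := by
  simp only [PySem.Dict.contains, List.any_eq_false]
  intro p hp
  have := mem_pvF_sum hp
  simp only [beq_iff_eq]
  intro h
  rw [h] at this
  omega

lemma contains_pvG_false (m k : Nat) :
    (PySem.Dict.mk (pvG m k)).contains ((m : Int) - (k : Int), (k : Int)) = false := by
  simp only [PySem.Dict.contains, List.any_eq_false]
  intro p hp
  simp only [pvG, List.mem_append, List.mem_map, List.mem_range] at hp
  simp only [beq_iff_eq]
  intro h
  rcases hp with hp | ⟨j, hj, rfl⟩
  · have := mem_pvF_sum hp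
    rw [h] at this
    omega
  · have h2 := congrArg Prod.snd h
    simp only at h2
    omega

-- one iteration of the while loop appends one fresh cell
lemma pvG_step (m k : Nat) :
    (PySem.Dict.mk (pvG m k)).insert ((m : Int) - (k : Int), (k : Int)) (pvP m + m + k)
      = PySem.Dict.mk (pvG m (k + 1)) := by
  apply PySem.Dict.ext
  rw [PySem.Dict.items_insert_of_not_contains _ _ (contains_pvG_false m k)]
  show pvG m k ++ _ = pvG m (k + 1)
  rw [pvG, pvG, List.range_succ, List.map_append, ← List.append_assoc]
  rfl

-- ===== A-side: A's inner loop on state (Dict.mk (pvF m), pvP m) appends exactly pvD m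
lemma A_inner (m : Nat) :
    ((PySem.List.pyRange (pvP m + m) (pvP m + m + m + 1) 1).foldl
      (fun d j => d.insert ((m : Int) - j + (pvP m + m), j - (pvP m + m)) j)
      (PySem.Dict.mk (pvF m))) = PySem.Dict.mk (pvF (m + 1)) := by
  apply PySem.Dict.ext
  have hfresh : ∀ a ∈ PySem.List.pyRange (pvP m + m) (pvP m + m + m + 1) 1,
      (PySem.Dict.mk (pvF m)).contains ((m : Int) - a + (pvP m + m), a - (pvP m + m)) = false := by
    intro a _
    exact contains_pvF_false m _ (by ring)
  have hnd : ((PySem.List.pyRange (pvP m + m) (pvP m + m + m + 1) 1).map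
      (fun a => ((m : Int) - a + (pvP m + m), a - (pvP m + m)))).Nodup := by
    apply List.Nodup.map _ (PySem.List.nodup_pyRange_one _ _)
    intro a b hab
    have := congrArg Prod.snd hab
    simp at this
    omega
  rw [PySem.Dict.items_foldl_insert_fresh _ _ _ _ hfresh hnd]
  rw [pvF_succ]
  congr 1
  rw [PySem.List.pyRange_one]
  have : (pvP m + m + m + 1 - (pvP m + m)).toNat = m + 1 := by omega
  rw [this, pvD, List.map_map]
  apply List.map_congr_left
  intro k hk
  simp only [Function.comp, Prod.mk.injEq]
  refine ⟨⟨?_, ?_⟩, ?_⟩ <;> first | trivial | ring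

lemma A_loop (m : Nat) :
    ((PySem.List.pyRange 0 (m : Int) 1).foldl
      (fun (st : PySem.Dict (Int × Int) Int × Int) i =>
        ((PySem.List.pyRange (st.2 + i) (st.2 + i + i + 1) 1).foldl
            (fun d j => d.insert (i - j + (st.2 + i), j - (st.2 + i)) j) st.1,
         st.2 + i))
      (PySem.Dict.empty, 0)) = (PySem.Dict.mk (pvF m), pvP m) := by
  induction m with
  | zero =>
    simp [PySem.List.pyRange_one_eq_nil (by norm_num : (0:Int) ≤ 0), pvF, pvP,
      PySem.Dict.empty]
  | succ t ih =>
    rw [Nat.cast_add, Nat.cast_one, PySem.List.pyRange_one_succ_right (by positivity),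
      List.foldl_append, ih]
    simp only [List.foldl_cons, List.foldl_nil, Prod.mk.injEq]
    exact ⟨A_inner t, by simp [pvP]⟩

-- ===== B-side: traverse one diagonal of the while loop
lemma B_inner (n : Int) (m : Nat) (hm : (m : Int) < n) :
    ∀ j k : Nat, k + j = m →
      coordLoop n (m : Int) (k : Int) (PySem.Dict.mk (pvG m k))
        = coordLoop n ((m : Int) + 1) 0 (PySem.Dict.mk (pvF (m + 1))) := by
  intro j
  induction j with
  | zero =>
    intro k hk
    have hk' : k = m := by omega
    subst hk'
    rw [coordLoop, if_pos hm]
    have hval : ((PySem.Dict.mk (pvG k k)).items.length : Int) = pvP k + k + k :=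
      length_pvG k k
    rw [if_neg (by omega : ¬ ((k : Int) < (k : Int)))]
    rw [hval, pvG_step, pvG_full]
  | succ t ih =>
    intro k hk
    rw [coordLoop, if_pos hm]
    have hval : ((PySem.Dict.mk (pvG m k)).items.length : Int) = pvP m + m + k :=
      length_pvG m k
    rw [if_pos (by omega : ((k : Int) < (m : Int)))]
    rw [hval, pvG_step]
    have : ((k : Int) + 1) = ((k + 1 : Nat) : Int) := by push_cast; ring
    rw [this]
    exact ih (k + 1) (by omega)

lemma B_outer (n : Int) :
    ∀ j m : Nat, m + j = n.toNat →
      coordLoop n (m : Int) 0 (PySem.Dict.mk (pvF m)) = PySem.Dict.mk (pvF n.toNat) := by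
  intro j
  induction j with
  | zero =>
    intro m hm
    rw [coordLoop, if_neg (by omega : ¬ ((m : Int) < n))]
    have hmn : m = n.toNat := by omega
    rw [hmn]
  | succ t ih =>
    intro m hm
    have hm' : (m : Int) < n := by omega
    have h0 : (PySem.Dict.mk (pvF m)) = PySem.Dict.mk (pvG m 0) := by
      apply PySem.Dict.ext
      show pvF m = pvG m 0
      simp [pvG]
    rw [h0]
    have hB := B_inner n m hm' m 0 (by omega)
    simp only [Nat.cast_zero] at hB
    rw [hB]
    have hcast : ((m : Int) + 1) = ((m + 1 : Nat) : Int) := by push_cast; ring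
    rw [hcast]
    exact ih (m + 1) (by omega)

lemma B_loop (n : Int) :
    coordLoop n 0 0 PySem.Dict.empty = PySem.Dict.mk (pvF n.toNat) := by
  have h0 : PySem.Dict.empty = PySem.Dict.mk (pvF 0) := rfl
  have := B_outer n n.toNat 0 (by omega)
  simpa [h0] using this

lemma pyRange_toNat (n : Int) :
    PySem.List.pyRange 0 n 1 = PySem.List.pyRange 0 (n.toNat : Int) 1 := by
  rw [PySem.List.pyRange_one, PySem.List.pyRange_one]
  congr 2
  omega

-- ===== VERDICT (by name: the statement is the Claim_ definition above) =====
theorem coordinate_spec : Claim_equal_coordinate := by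
  intro n _
  unfold Spec_coordinate coordinate coordinate_alt
  rw [pyRange_toNat, A_loop n.toNat, B_loop n]
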